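-- pv_equiv track=rewrite | github.com/Kazuya-Hibara/ir-podcast-plugin | scripts/edinet_fetch.py | filter_by_company
-- ===== SOURCE A (Python) =====
-- DOC_TYPES = {
--     "yuho": "120",          # 有価証券報告書
--     "shihanki": "140",      # 四半期報告書
--     "hanki": "160",         # 半期報告書
--     "rinji": "180",         # 臨時報告書
--     "kessan-tanshin": "350",  # 決算短信 (注: TDnet 経由が main、EDINET には全件来ない)
-- }
--
-- def filter_by_company(
--     documents: list[dict],
--     sec_code: str | None = None,
--     edinet_code: str | None = None,
--     doc_types: list[str] | None = None,
-- ) -> list[dict]: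
--     """銘柄コード or EDINET コードで filter."""
--     result = documents
--     if sec_code:
--         padded = sec_code + "0" if len(sec_code) == 4 else sec_code
--         result = [d for d in result if d.get("secCode") in (sec_code, padded)]
--     if edinet_code:
--         result = [d for d in result if d.get("edinetCode") == edinet_code]
--     if doc_types:
--         codes = {DOC_TYPES[t] for t in doc_types if t in DOC_TYPES}
--         result = [d for d in result if d.get("docTypeCode") in codes]
--     return sorted(result, key=lambda d: d.get("submitDateTime", ""), reverse=True)
-- ===== SOURCE B (Python) =====
-- DOC_TYPES = {
--     "yuho": "120",
--     "shihanki": "140",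
--     "hanki": "160",
--     "rinji": "180",
--     "kessan-tanshin": "350",
-- }
--
--
-- def filter_by_company(
--     documents,
--     sec_code=None,
--     edinet_code=None,
--     doc_types=None,
-- ):
--     """Single pass: precompute the helpers, keep a doc only if it passes every active condition."""
--     padded = sec_code + "0" if sec_code and len(sec_code) == 4 else sec_code
--     codes = {DOC_TYPES[t] for t in doc_types if t in DOC_TYPES} if doc_types else None
--
--     def keep(d):
--         if sec_code and d.get("secCode") not in (sec_code, padded):
--             return False
--         if edinet_code and d.get("edinetCode") != edinet_code:
--             return False
--         if doc_types and d.get("docTypeCode") not in codes: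
--             return False
--         return True
--
--     return sorted((d for d in documents if keep(d)),
--                   key=lambda d: d.get("submitDateTime", ""), reverse=True)
-- ===== Notes on version B (the rewrite author's own statement) =====
-- stated objective: simpler
-- what changed: The three separate conditional filter passes over the list are fused into one traversal with a single keep() predicate, with padded and the codes set computed once up front.
import Mathlib
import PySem

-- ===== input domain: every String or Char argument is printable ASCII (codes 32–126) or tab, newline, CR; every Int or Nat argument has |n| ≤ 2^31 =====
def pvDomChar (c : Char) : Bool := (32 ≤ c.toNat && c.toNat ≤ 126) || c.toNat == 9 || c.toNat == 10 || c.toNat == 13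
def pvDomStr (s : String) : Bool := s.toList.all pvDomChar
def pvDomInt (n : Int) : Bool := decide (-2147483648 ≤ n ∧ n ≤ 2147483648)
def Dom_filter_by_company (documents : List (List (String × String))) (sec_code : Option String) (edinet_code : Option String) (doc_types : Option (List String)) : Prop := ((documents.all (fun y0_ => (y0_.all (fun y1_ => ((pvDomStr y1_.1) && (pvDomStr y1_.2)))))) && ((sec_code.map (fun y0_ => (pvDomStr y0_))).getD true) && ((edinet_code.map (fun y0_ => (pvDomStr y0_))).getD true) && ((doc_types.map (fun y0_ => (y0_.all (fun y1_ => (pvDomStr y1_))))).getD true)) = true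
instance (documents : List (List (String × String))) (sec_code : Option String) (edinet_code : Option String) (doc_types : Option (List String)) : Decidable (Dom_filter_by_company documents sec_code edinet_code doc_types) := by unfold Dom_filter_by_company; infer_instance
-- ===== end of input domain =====

-- B fuses A's three conditional filter passes into one traversal with a single keep predicate
-- (padded and the codes set computed once up front); objective: simpler, same asymptotic cost.

-- ===== PORT A =====
def pvDocTypesA : PySem.Dict String String :=
  PySem.Dict.mk [("yuho","120"),("shihanki","140"),("hanki","160"),("rinji","180"),("kessan-tanshin","350")]

def filter_by_company (documents : List (List (String × String))) (sec_code : Option String) (edinet_code : Option String) (doc_types : Option (List String)) : List (List (String × String)) :=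
  let result := documents
  let result :=
    match sec_code with
    | none => result
    | some s =>
      if s == "" then result
      else
        let padded := if PySem.Str.len s == 4 then s ++ "0" else s
        result.filter (fun d =>
          PySem.Dict.get? (PySem.Dict.mk d) "secCode" == some s ||
          PySem.Dict.get? (PySem.Dict.mk d) "secCode" == some padded)
  let result :=
    match edinet_code with
    | none => result
    | some e =>
      if e == "" then result
      else result.filter (fun d => PySem.Dict.get? (PySem.Dict.mk d) "edinetCode" == some e)
  let result :=
    match doc_types with
    | none => result
    | some ts =>
      if ts == ([] : List String) then result
      else
        let codes : PySem.Set String :=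
          ts.foldl (fun s t =>
            match PySem.Dict.get? pvDocTypesA t with
            | some c => PySem.Set.add s c
            | none => s) PySem.Set.empty
        result.filter (fun d =>
          match PySem.Dict.get? (PySem.Dict.mk d) "docTypeCode" with
          | some v => PySem.Set.contains codes v
          | none => false)
  PySem.List.sorted result (fun d => PySem.Dict.getD (PySem.Dict.mk d) "submitDateTime" "") true

-- ===== PORT B =====
def pvTruthyStr : Option String → Bool
  | none => false
  | some s => !(s == "")

def pvTruthyList : Option (List String) → Bool
  | none => false
  | some l => !(l == ([] : List String))

def filter_by_company_alt (documents : List (List (String × String))) (sec_code : Option String) (edinet_code : Option String) (doc_types : Option (List String)) : List (List (String × String)) :=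
  let padded : Option String :=
    if pvTruthyStr sec_code && ((sec_code.map PySem.Str.len).getD 0 == 4)
    then sec_code.map (fun s => s ++ "0") else sec_code
  let codes : PySem.Set String :=
    if pvTruthyList doc_types then
      (doc_types.getD []).foldl (fun s t =>
        match PySem.Dict.get? pvDocTypesA t with
        | some c => PySem.Set.add s c
        | none => s) PySem.Set.empty
    else PySem.Set.empty
  let keep : List (String × String) → Bool := fun d =>
    (!pvTruthyStr sec_code ||
      (PySem.Dict.get? (PySem.Dict.mk d) "secCode" == sec_code ||
       PySem.Dict.get? (PySem.Dict.mk d) "secCode" == padded)) &&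
    (!pvTruthyStr edinet_code ||
      PySem.Dict.get? (PySem.Dict.mk d) "edinetCode" == edinet_code) &&
    (!pvTruthyList doc_types ||
      (match PySem.Dict.get? (PySem.Dict.mk d) "docTypeCode" with
       | some v => PySem.Set.contains codes v
       | none => false))
  PySem.List.sorted (documents.filter keep) (fun d => PySem.Dict.getD (PySem.Dict.mk d) "submitDateTime" "") true

-- ===== PRECONDITION & SPEC =====
def Spec_filter_by_company (documents : List (List (String × String))) (sec_code : Option String) (edinet_code : Option String) (doc_types : Option (List String)) (out : List (List (String × String))) : Prop := out = filter_by_company_alt documents sec_code edinet_code doc_types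
instance (documents : List (List (String × String))) (sec_code : Option String) (edinet_code : Option String) (doc_types : Option (List String)) (out : List (List (String × String))) : Decidable (Spec_filter_by_company documents sec_code edinet_code doc_types out) := by unfold Spec_filter_by_company; infer_instance

-- ===== CLAIM (what is proved, stated in full; the proofs are below) =====
def Claim_equal_filter_by_company : Prop := ∀ (documents : List (List (String × String))) (sec_code : Option String) (edinet_code : Option String) (doc_types : Option (List String)), Dom_filter_by_company documents sec_code edinet_code doc_types → Spec_filter_by_company documents sec_code edinet_code doc_types (filter_by_company documents sec_code edinet_code doc_types)

-- ===== LEMMAS AND PROOFS =====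

theorem pvIsEmptyFalse {α : Type} {l : List α} (h : ¬l = []) : l.isEmpty = false := by
  cases l <;> simp_all

theorem pvBeqFalse {a b : String} (h : ¬a = b) : (a == b) = false := by
  simpa [beq_eq_false_iff_ne] using h

theorem filter_by_company_eq_alt (documents : List (List (String × String))) (sec_code : Option String) (edinet_code : Option String) (doc_types : Option (List String)) :
    filter_by_company documents sec_code edinet_code doc_types = filter_by_company_alt documents sec_code edinet_code doc_types := by
  unfold filter_by_company filter_by_company_alt
  cases sec_code <;> cases edinet_code <;> cases doc_types <;>
    simp only [pvTruthyStr, pvTruthyList, Option.map_some, Option.map_none, Option.getD_some,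
      Option.getD_none] <;>
    split_ifs <;>
    simp_all [List.filter_filter] <;>
    (apply congrArg (fun l => PySem.List.sorted l _ true); apply List.filter_congr;
     intro d _; cases hs : PySem.Dict.get? (PySem.Dict.mk d) "secCode" <;>
       cases he : PySem.Dict.get? (PySem.Dict.mk d) "edinetCode" <;>
       cases ht : PySem.Dict.get? (PySem.Dict.mk d) "docTypeCode" <;>
       simp_all [pvIsEmptyFalse, pvBeqFalse] <;>
       (first | rfl | ac_rfl))

-- ===== VERDICT (by name: the statement is the Claim_ definition above) =====
theorem filter_by_company_spec : Claim_equal_filter_by_company := by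
  intro documents sec_code edinet_code doc_types _
  unfold Spec_filter_by_company
  exact filter_by_company_eq_alt documents sec_code edinet_code doc_types
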